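-- pv_equiv track=rewrite | github.com/theofabilous/bitarray | python/formatting.py | get_all_pair_wise_args_compressed
-- ===== SOURCE A (Python) =====
-- def expand_variadic(num, npl, f, rev=False):
-- 	itrb = (f(i) for i in range(1, num+1))
-- 	if rev:
-- 		itrb = reversed(list(itrb))
-- 	l = []
-- 	acc = []
-- 	for i, s in enumerate(itrb):
-- 		if i != 0 and (not (i % npl)):
-- 			l.append(", ".join(acc + [s]))
-- 			acc = []
-- 		else:
-- 			acc.append(s)
-- 	if(len(acc) != 0):
-- 		l.append(", ".join(acc))
-- 	return ", \\\n".join(l)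
--
-- def get_compressed_args(arg_prefix, num, get_l=False):
-- 	def rec_(i):
-- 		if i==1:
-- 			return f"#define {arg_prefix}_1 __EXPAND(_1, _2)"
-- 		else:
-- 			return f"#define {arg_prefix}_{i} " + \
-- 				   f"__INCR_EXPAND(_{(i*2)-1}, _{i*2}, {arg_prefix}_{i-1})"
-- 	l = [rec_(i) for i in range(1, (num // 2)+1)]
-- 	if get_l: return l
-- 	else: return "\n".join(l)
--
-- def get_all_pair_wise_args_compressed(aprefix, prefix, num):
-- 	args = get_compressed_args(aprefix, num, True)
-- 	defs = []
-- 	for i, a in enumerate(args):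
-- 		defs.append( f"#define {prefix}_{(i+1)*2}(" + \
-- 			expand_variadic((i+1)*2, 8, lambda i: f"_{i}") + ") \\\n" + \
-- 			f"WRAP_BEGIN {aprefix}_{i+1} WRAP_END\n" )
-- 	return "\n".join(defs)
-- ===== SOURCE B (Python) =====
-- def get_all_pair_wise_args_compressed(aprefix, prefix, num):
--     defs = []
--     for j in range(1, num // 2 + 1):
--         tokens = [f"_{i}" for i in range(1, 2 * j + 1)]
--         chunks = [tokens[:9]]
--         k = 9
--         while k < len(tokens):
--             chunks.append(tokens[k:k + 8])
--             k += 8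
--         argstr = ", \\\n".join(", ".join(c) for c in chunks)
--         defs.append(f"#define {prefix}_{2 * j}(" + argstr + ") \\\n"
--                     f"WRAP_BEGIN {aprefix}_{j} WRAP_END\n")
--     return "\n".join(defs)
-- ===== Notes on version B (the rewrite author's own statement) =====
-- stated objective: simpler
-- what changed: B drops A's get_compressed_args phase (whose strings are never used, only their count num//2) and replaces the expand_variadic modulo-accumulator flush loop by direct slice-based chunking: tokens[:9] then successive 8-token slices, each comma-joined.
import Mathlib
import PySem

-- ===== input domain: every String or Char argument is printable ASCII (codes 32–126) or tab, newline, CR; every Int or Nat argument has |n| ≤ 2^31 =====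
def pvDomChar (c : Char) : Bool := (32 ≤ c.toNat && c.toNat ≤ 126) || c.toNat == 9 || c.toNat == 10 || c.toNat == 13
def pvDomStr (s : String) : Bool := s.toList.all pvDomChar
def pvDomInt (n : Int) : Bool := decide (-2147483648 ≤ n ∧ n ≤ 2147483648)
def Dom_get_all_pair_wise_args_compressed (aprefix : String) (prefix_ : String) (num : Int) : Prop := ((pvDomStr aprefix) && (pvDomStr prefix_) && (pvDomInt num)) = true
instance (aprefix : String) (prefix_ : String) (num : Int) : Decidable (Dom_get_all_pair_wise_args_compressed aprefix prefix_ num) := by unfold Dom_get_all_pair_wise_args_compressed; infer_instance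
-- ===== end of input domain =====

-- B replaces A's two-phase table-build (unused strings list) + modulo-accumulator flush loop by one direct
-- range pass with slice-based chunking (first chunk 9 tokens, then 8); objective: simpler, same cost.

-- ===== PORT A =====
-- body of A's 'for i, s in enumerate(itrb)' loop in expand_variadic
def pvExpandLoop (npl : Int) (st : List String × List String) (p : Int × String) :
    List String × List String :=
  if p.1 ≠ 0 ∧ PySem.Int.mod p.1 npl = 0 then
    (st.1 ++ [PySem.Str.join ", " (st.2 ++ [p.2])], [])
  else
    (st.1, st.2 ++ [p.2])

def pvExpandVariadic (num npl : Int) (f : Int → String) (rev : Bool) : String :=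
  let itrb0 := (PySem.List.pyRange 1 (num + 1) 1).map f
  let itrb := if rev then itrb0.reverse else itrb0
  let res := List.foldl (pvExpandLoop npl) ([], []) (PySem.List.enumerate itrb 0)
  let l := if res.2.length ≠ 0 then res.1 ++ [PySem.Str.join ", " res.2] else res.1
  PySem.Str.join ", \\\n" l

-- rec_ inside get_compressed_args
def pvRec (arg_prefix : String) (i : Int) : String :=
  if i = 1 then "#define " ++ arg_prefix ++ "_1 __EXPAND(_1, _2)"
  else "#define " ++ arg_prefix ++ "_" ++ PySem.Int.toStr i ++ " " ++
       "__INCR_EXPAND(_" ++ PySem.Int.toStr (i * 2 - 1) ++ ", _" ++ PySem.Int.toStr (i * 2) ++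
       ", " ++ arg_prefix ++ "_" ++ PySem.Int.toStr (i - 1) ++ ")"

-- get_compressed_args(…, get_l=True) path (the only one A's entry uses): the list l
def pvCompressedArgs (arg_prefix : String) (num : Int) : List String :=
  (PySem.List.pyRange 1 (PySem.Int.floordiv num 2 + 1) 1).map (pvRec arg_prefix)

def get_all_pair_wise_args_compressed (aprefix : String) (prefix_ : String) (num : Int) : String :=
  let args := pvCompressedArgs aprefix num
  let defs := List.foldl
    (fun (defs : List String) (p : Int × String) =>
      defs ++ ["#define " ++ prefix_ ++ "_" ++ PySem.Int.toStr ((p.1 + 1) * 2) ++ "(" ++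
        pvExpandVariadic ((p.1 + 1) * 2) 8 (fun i => "_" ++ PySem.Int.toStr i) false ++ ") \\\n" ++
        ("WRAP_BEGIN " ++ aprefix ++ "_" ++ PySem.Int.toStr (p.1 + 1) ++ " WRAP_END\n")])
    [] (PySem.List.enumerate args 0)
  PySem.Str.join "\n" defs

-- ===== PORT B =====
-- the 'while k < len(tokens): chunks.append(tokens[k:k+8]); k += 8' loop of Source B
def pvChunksFrom (tokens : List String) (k : Nat) : List (List String) :=
  if _h : k < tokens.length then
    PySem.List.slice tokens (some (k : Int)) (some ((k : Int) + 8)) :: pvChunksFrom tokens (k + 8)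
  else []
termination_by tokens.length - k

def get_all_pair_wise_args_compressed_alt (aprefix : String) (prefix_ : String) (num : Int) : String :=
  let defs := List.foldl
    (fun (defs : List String) (j : Int) =>
      let tokens := (PySem.List.pyRange 1 (2 * j + 1) 1).map (fun i => "_" ++ PySem.Int.toStr i)
      let chunks := PySem.List.slice tokens none (some 9) :: pvChunksFrom tokens 9
      let argstr := PySem.Str.join ", \\\n" (chunks.map (fun c => PySem.Str.join ", " c))
      defs ++ ["#define " ++ prefix_ ++ "_" ++ PySem.Int.toStr (2 * j) ++ "(" ++ argstr ++ ") \\\n" ++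
        ("WRAP_BEGIN " ++ aprefix ++ "_" ++ PySem.Int.toStr j ++ " WRAP_END\n")])
    [] (PySem.List.pyRange 1 (PySem.Int.floordiv num 2 + 1) 1)
  PySem.Str.join "\n" defs

-- ===== PRECONDITION & SPEC =====
def Spec_get_all_pair_wise_args_compressed (aprefix : String) (prefix_ : String) (num : Int) (out : String) : Prop := out = get_all_pair_wise_args_compressed_alt aprefix prefix_ num
instance (aprefix : String) (prefix_ : String) (num : Int) (out : String) : Decidable (Spec_get_all_pair_wise_args_compressed aprefix prefix_ num out) := by unfold Spec_get_all_pair_wise_args_compressed; infer_instance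

-- ===== CLAIM (what is proved, stated in full; the proofs are below) =====
def Claim_equal_get_all_pair_wise_args_compressed : Prop := ∀ (aprefix : String) (prefix_ : String) (num : Int), Dom_get_all_pair_wise_args_compressed aprefix prefix_ num → Spec_get_all_pair_wise_args_compressed aprefix prefix_ num (get_all_pair_wise_args_compressed aprefix prefix_ num)

-- ===== LEMMAS AND PROOFS =====

-- chunks produced by A's flush loop, started at index s with pending accumulator acc
def pvH : Int → List String → List String → List (List String)
  | _, acc, [] => if acc = [] then [] else [acc]
  | s, acc, t :: ts =>
      if PySem.Int.mod s 8 = 0 then (acc ++ [t]) :: pvH (s + 1) [] ts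
      else pvH (s + 1) (acc ++ [t]) ts

-- the same chunks, computed take/drop-wise
def pvHC : List String → List String → List (List String)
  | acc, ts =>
    if h : ts.length < 8 then (if acc ++ ts = [] then [] else [acc ++ ts])
    else (acc ++ ts.take 8) :: pvHC [] (ts.drop 8)
termination_by _ ts => ts.length
decreasing_by simp; omega

theorem pv_main : ∀ (ts : List String) (l acc : List String) (s : Int), 0 < s →
    (let res := List.foldl (pvExpandLoop 8) (l, acc) (PySem.List.enumerate ts s)
     PySem.Str.join ", \\\n" (if res.2.length ≠ 0 then res.1 ++ [PySem.Str.join ", " res.2] else res.1))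
    = PySem.Str.join ", \\\n" (l ++ (pvH s acc ts).map (PySem.Str.join ", ")) := by
  intro ts
  induction ts with
  | nil =>
      intro l acc s hs
      simp only [PySem.List.enumerate_nil, List.foldl_nil, pvH]
      by_cases hacc : acc = []
      · subst hacc; simp
      · simp [hacc, List.length_eq_zero_iff]
  | cons t ts ih =>
      intro l acc s hs
      rw [PySem.List.enumerate_cons, List.foldl_cons]
      by_cases hm : PySem.Int.mod s 8 = 0
      · have hstep : pvExpandLoop 8 (l, acc) (s, t)
            = (l ++ [PySem.Str.join ", " (acc ++ [t])], []) := by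
          unfold pvExpandLoop
          rw [if_pos ⟨by omega, hm⟩]
        rw [hstep, ih _ _ _ (by omega)]
        have hd := (PySem.Int.mod_eq_zero_iff_dvd s 8).mp hm
        simp [pvH, hd, List.append_assoc]
      · have hstep : pvExpandLoop 8 (l, acc) (s, t) = (l, acc ++ [t]) := by
          unfold pvExpandLoop
          rw [if_neg (fun hc => hm hc.2)]
        rw [hstep, ih _ _ _ (by omega)]
        have hnd : ¬ (8:Int) ∣ s := fun hd => hm ((PySem.Int.mod_eq_zero_iff_dvd s 8).mpr hd)
        simp [pvH, hnd]

theorem pvH_noflush : ∀ (ts acc : List String) (s : Int),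
    0 < PySem.Int.mod s 8 → ts.length + (PySem.Int.mod s 8).toNat ≤ 8 →
    pvH s acc ts = if acc ++ ts = [] then [] else [acc ++ ts] := by
  intro ts
  induction ts with
  | nil => intro acc s _ _; simp [pvH]
  | cons t ts ih =>
      intro acc s hpos hlen
      have e1 : PySem.Int.mod s 8 = s % 8 := PySem.Int.mod_eq_emod_of_pos (by norm_num)
      have e2 : PySem.Int.mod (s + 1) 8 = (s + 1) % 8 := PySem.Int.mod_eq_emod_of_pos (by norm_num)
      rw [e1] at hpos hlen
      have hm : ¬ PySem.Int.mod s 8 = 0 := by rw [e1]; omega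
      simp only [pvH, if_neg hm]
      cases ts with
      | nil => simp [pvH]
      | cons u us =>
          simp only [List.length_cons] at hlen
          rw [ih (acc ++ [t]) (s + 1) (by rw [e2]; omega) (by rw [e2]; simp; omega)]
          simp

theorem pvH_flush8 : ∀ (ts acc : List String) (s : Int),
    PySem.Int.mod s 8 = 1 → 8 ≤ ts.length →
    pvH s acc ts = (acc ++ ts.take 8) :: pvH (s + 8) [] (ts.drop 8) := by
  intro ts acc s hm1 hlen
  have hnz : ∀ r : Int, PySem.Int.mod r 8 = r % 8 :=
    fun r => PySem.Int.mod_eq_emod_of_pos (by norm_num)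
  rw [hnz] at hm1
  rcases ts with _|⟨t1,_|⟨t2,_|⟨t3,_|⟨t4,_|⟨t5,_|⟨t6,_|⟨t7,_|⟨t8,rest⟩⟩⟩⟩⟩⟩⟩⟩ <;>
    simp only [List.length_nil, List.length_cons] at hlen <;> try omega
  simp only [pvH]
  rw [if_neg (by rw [hnz]; omega), if_neg (by rw [hnz]; omega), if_neg (by rw [hnz]; omega),
      if_neg (by rw [hnz]; omega), if_neg (by rw [hnz]; omega), if_neg (by rw [hnz]; omega),
      if_neg (by rw [hnz]; omega), if_pos (by rw [hnz]; omega)]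
  have : s + 1 + 1 + 1 + 1 + 1 + 1 + 1 + 1 = s + 8 := by ring
  rw [this]
  simp

theorem pvH_eq_pvHC : ∀ (n : Nat) (ts acc : List String) (s : Int), ts.length ≤ n →
    0 < s → PySem.Int.mod s 8 = 1 → pvH s acc ts = pvHC acc ts := by
  intro n
  induction n with
  | zero =>
      intro ts acc s hle _ _
      have : ts = [] := List.eq_nil_of_length_eq_zero (by omega)
      subst this
      rw [pvHC]
      simp [pvH]
  | succ n ih =>
      intro ts acc s hle hs hm
      by_cases h8 : 8 ≤ ts.length
      · rw [pvH_flush8 ts acc s hm h8, pvHC, dif_neg (by omega)]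
        have hm' : PySem.Int.mod (s + 8) 8 = 1 := by
          rw [PySem.Int.mod_eq_emod_of_pos (by norm_num)] at hm ⊢
          omega
        rw [ih (ts.drop 8) [] (s + 8) (by rw [List.length_drop]; omega) (by omega) hm']
      · rw [pvH_noflush ts acc s (by rw [hm]; norm_num) (by rw [hm]; simp; omega),
            pvHC, dif_pos (by omega)]

theorem pvHC_drop_eq_chunksFrom : ∀ (n : Nat) (ts : List String) (k : Nat), ts.length - k ≤ n →
    pvHC [] (ts.drop k) = pvChunksFrom ts k := by
  intro n
  induction n with
  | zero =>
      intro ts k hle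
      rw [pvChunksFrom, dif_neg (by omega), List.drop_eq_nil_of_le (by omega), pvHC]
      simp
  | succ n ih =>
      intro ts k hle
      by_cases hk : k < ts.length
      · have hsl : PySem.List.slice ts (some (k:Int)) (some ((k:Int) + 8)) = (ts.drop k).take 8 := by
          have h := PySem.List.slice_natCast_add ts k 8
          norm_num at h
          exact h
        rw [pvChunksFrom, dif_pos hk, hsl, pvHC]
        by_cases h8 : (ts.drop k).length < 8
        · rw [dif_pos h8]
          have hne : ts.drop k ≠ [] := by
            intro h; have := congrArg List.length h; simp at this; omega
          rw [if_neg (by simpa using hne)]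
          rw [List.take_of_length_le (by omega)]
          rw [pvChunksFrom, dif_neg (by rw [List.length_drop] at h8; omega)]
          simp
        · rw [dif_neg h8]
          rw [List.length_drop] at h8
          have hdd : (ts.drop k).drop 8 = ts.drop (k + 8) := by
            rw [List.drop_drop]
          rw [hdd, ih ts (k + 8) (by omega)]
          simp
      · rw [pvChunksFrom, dif_neg hk, List.drop_eq_nil_of_le (by omega), pvHC]
        simp

theorem pvHC_head : ∀ (t0 : String) (rest : List String),
    pvHC [t0] rest = List.take 9 (t0 :: rest) :: pvChunksFrom (t0 :: rest) 9 := by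
  intro t0 rest
  rw [pvHC]
  by_cases h8 : rest.length < 8
  · rw [dif_pos h8, if_neg (by simp)]
    rw [List.take_of_length_le (by simp; omega)]
    rw [pvChunksFrom, dif_neg (by simp; omega)]
    simp
  · rw [dif_neg h8]
    have h1 : [t0] ++ rest.take 8 = List.take 9 (t0 :: rest) := by
      simp [List.take_succ_cons]
    have h2 : rest.drop 8 = (t0 :: rest).drop 9 := by simp
    rw [h1, h2, pvHC_drop_eq_chunksFrom (t0 :: rest).length _ 9 (by omega)]

theorem pv_expand_eq (n : Int) (hn : 2 ≤ n) (f : Int → String) :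
    pvExpandVariadic n 8 f false =
      PySem.Str.join ", \\\n"
        ((PySem.List.slice ((PySem.List.pyRange 1 (n + 1) 1).map f) none (some 9) ::
            pvChunksFrom ((PySem.List.pyRange 1 (n + 1) 1).map f) 9).map
          (fun c => PySem.Str.join ", " c)) := by
  have hcons : PySem.List.pyRange 1 (n + 1) = 1 :: PySem.List.pyRange 2 (n + 1) :=
    PySem.List.pyRange_one_cons (by omega)
  simp only [pvExpandVariadic, Bool.false_eq_true, if_false, hcons, List.map_cons,
    PySem.List.enumerate_cons, List.foldl_cons]
  have hstep : pvExpandLoop 8 ([], []) (0, f 1) = ([], [f 1]) := by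
    unfold pvExpandLoop
    rw [if_neg (by simp)]
    rfl
  rw [hstep]
  simp only [zero_add]
  have hmain := pv_main ((PySem.List.pyRange 2 (n + 1)).map f) [] [f 1] 1 (by norm_num)
  simp only [] at hmain
  rw [hmain]
  rw [pvH_eq_pvHC ((PySem.List.pyRange 2 (n + 1)).map f).length _ _ 1 le_rfl (by norm_num)
      (by decide)]
  rw [pvHC_head]
  rw [PySem.List.slice_to _ (show (0:Int) ≤ 9 by norm_num)]
  simp

-- ===== VERDICT (by name: the statement is the Claim_ definition above) =====
theorem pv_map_enum_fst {α β : Type} (xs : List α) (s : Int) (G : Int → β) :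
    (PySem.List.enumerate xs s).map (fun p => G p.1)
      = (PySem.List.pyRange s (s + xs.length)).map G := by
  rw [← PySem.List.map_fst_enumerate xs s, List.map_map]
  rfl

theorem get_all_pair_wise_args_compressed_spec : Claim_equal_get_all_pair_wise_args_compressed := by
  intro aprefix prefix_ num _
  unfold Spec_get_all_pair_wise_args_compressed
  unfold get_all_pair_wise_args_compressed get_all_pair_wise_args_compressed_alt
  simp only [PySem.List.foldl_append_singleton_eq_map, List.nil_append]
  congr 1
  rw [pv_map_enum_fst (pvCompressedArgs aprefix num) 0
      (fun i => "#define " ++ prefix_ ++ "_" ++ PySem.Int.toStr ((i + 1) * 2) ++ "(" ++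
        pvExpandVariadic ((i + 1) * 2) 8 (fun i => "_" ++ PySem.Int.toStr i) false ++ ") \\\n" ++
        ("WRAP_BEGIN " ++ aprefix ++ "_" ++ PySem.Int.toStr (i + 1) ++ " WRAP_END\n"))]
  have hlen : (pvCompressedArgs aprefix num).length
      = (PySem.Int.floordiv num 2).toNat := by
    simp [pvCompressedArgs, PySem.List.length_pyRange_one]
  rw [hlen]
  rw [PySem.List.pyRange_one 0, PySem.List.pyRange_one 1]
  have h1 : ((PySem.Int.floordiv num 2 + 1) - 1).toNat = (PySem.Int.floordiv num 2).toNat := by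
    omega
  have h0 : ((0:Int) + ((PySem.Int.floordiv num 2).toNat : Int) - 0).toNat
      = (PySem.Int.floordiv num 2).toNat := by omega
  rw [h1, h0, List.map_map, List.map_map]
  apply List.map_congr_left
  intro k _
  simp only [Function.comp_apply]
  rw [show ((0:Int) + (k:Int) + 1) * 2 = 2 * (1 + (k:Int)) by ring,
      show ((0:Int) + (k:Int) + 1) = 1 + (k:Int) by ring]
  rw [pv_expand_eq (2 * (1 + (k:Int))) (by omega) (fun i => "_" ++ PySem.Int.toStr i)]
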